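-- pv_equiv track=rewrite | github.com/Axym-Labs/pptrain | src/pptrain/eval/tasks/arc_agi2.py | parse_grid_text
-- ===== SOURCE A (Python) =====
-- Grid = list[list[int]]
--
-- def parse_grid_text(text: str) -> Grid | None:
--     rows: list[list[int]] = []
--     for raw_line in text.strip().splitlines():
--         line = raw_line.strip()
--         if not line:
--             if rows:
--                 break
--             continue
--         parts = line.split()
--         if not parts or not all(part.isdigit() and 0 <= int(part) <= 9 for part in parts):
--             if rows:
--                 break
--             continue
--         rows.append([int(part) for part in parts])
--     if not rows:
--         return None
--     width = len(rows[0])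
--     if any(len(row) != width for row in rows):
--         return None
--     return rows
-- ===== SOURCE B (Python) =====
-- def parse_grid_text(text):
--     def valid(line):
--         parts = line.split()
--         return bool(parts) and all(p.isdigit() and 0 <= int(p) <= 9 for p in parts)
--
--     lines = [l.strip() for l in text.strip().splitlines()]
--     n = len(lines)
--     i = 0
--     while i < n and not valid(lines[i]):
--         i += 1
--     j = i
--     while j < n and valid(lines[j]):
--         j += 1
--     grid = [[int(p) for p in line.split()] for line in lines[i:j]]
--     if not grid:
--         return None
--     return grid if len({len(row) for row in grid}) == 1 else None
-- ===== Notes on version B (the rewrite author's own statement) =====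
-- stated objective: alternative
-- what changed: A's single accumulate-with-break/continue loop is replaced by two index scans that locate the start and end of the contiguous valid-line block, a slice of that block mapped to rows, and a set-cardinality width-uniformity check instead of A's any-mismatch scan.
import Mathlib
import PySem

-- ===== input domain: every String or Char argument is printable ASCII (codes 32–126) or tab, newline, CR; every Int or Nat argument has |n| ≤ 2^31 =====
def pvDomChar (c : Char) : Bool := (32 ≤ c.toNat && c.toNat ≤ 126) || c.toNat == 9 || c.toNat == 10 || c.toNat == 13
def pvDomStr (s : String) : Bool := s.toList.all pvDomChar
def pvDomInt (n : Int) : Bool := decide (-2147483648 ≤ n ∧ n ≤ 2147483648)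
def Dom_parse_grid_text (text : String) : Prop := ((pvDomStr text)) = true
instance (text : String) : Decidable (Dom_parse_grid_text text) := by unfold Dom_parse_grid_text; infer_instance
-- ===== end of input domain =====

-- B replaces A's single accumulate-with-break/continue loop by two index scans locating the
-- contiguous valid-line block, a slice of it, and a set-cardinality width check (alternative).

-- ===== PORT A =====
-- part.isdigit() and 0 <= int(part) <= 9  (int(part) is only reached when isdigit holds, so getD 0 is exact)
def pvTok (part : String) : Bool :=
  PySem.Str.strIsdigit part &&
    (decide (0 ≤ (PySem.Int.ofStr? part).getD 0) && decide ((PySem.Int.ofStr? part).getD 0 ≤ 9))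

-- int(part), always guarded by isdigit in both programs
def pvInt (part : String) : Int := (PySem.Int.ofStr? part).getD 0

-- A's for-loop with `break`/`continue`, state = rows
def pvLoopA : List String → List (List Int) → List (List Int)
  | [], rows => rows
  | raw :: rest, rows =>
    let line := PySem.Str.strip raw
    if PySem.Str.len line == 0 then
      (if rows.isEmpty then pvLoopA rest rows else rows)
    else
      let parts := PySem.Str.split₀ line
      if parts.isEmpty || !(parts.all pvTok) then
        (if rows.isEmpty then pvLoopA rest rows else rows)
      else pvLoopA rest (rows ++ [parts.map pvInt])

def parse_grid_text (text : String) : Option (List (List Int)) :=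
  let rows := pvLoopA (PySem.Str.splitlines (PySem.Str.strip text)) []
  if rows.isEmpty then none
  else
    let width := (rows.headD []).length
    if rows.any (fun row => row.length != width) then none else some rows

-- ===== PORT B =====
-- valid(line) of Source B
def pvValid (line : String) : Bool :=
  let parts := PySem.Str.split₀ line
  !parts.isEmpty && parts.all pvTok

-- `while i < n and p(lines[i]): i += 1` of Source B (used for both scans, with their predicate p)
def pvScan (p : String → Bool) (lines : List String) (i : Nat) : Nat :=
  if h : i < lines.length then
    if p lines[i] then pvScan p lines (i + 1) else i
  else i
termination_by lines.length - i

def parse_grid_text_alt (text : String) : Option (List (List Int)) :=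
  let lines := (PySem.Str.splitlines (PySem.Str.strip text)).map PySem.Str.strip
  let i := pvScan (fun l => !pvValid l) lines 0
  let j := pvScan pvValid lines i
  let grid := (PySem.List.slice lines (some (i : Int)) (some (j : Int))).map
      (fun line => (PySem.Str.split₀ line).map pvInt)
  if grid.isEmpty then none
  else if (PySem.Set.ofList (grid.map List.length)).length == 1 then some grid else none

-- ===== PRECONDITION & SPEC =====
def Spec_parse_grid_text (text : String) (out : Option (List (List Int))) : Prop := out = parse_grid_text_alt text
instance (text : String) (out : Option (List (List Int))) : Decidable (Spec_parse_grid_text text out) := by unfold Spec_parse_grid_text; infer_instance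

-- ===== CLAIM (what is proved, stated in full; the proofs are below) =====
def Claim_equal_parse_grid_text : Prop := ∀ (text : String), Dom_parse_grid_text text → Spec_parse_grid_text text (parse_grid_text text)

-- ===== LEMMAS AND PROOFS =====

-- a line that strips to length 0 has no parts
theorem pv_len_zero_split (s : String) (h : PySem.Str.len s == 0) : PySem.Str.split₀ s = [] := by
  simp [PySem.Str.len] at h
  subst h
  rfl

-- pvValid is the negation of A's combined skip/break condition on nonempty lines
theorem pvValid_eq (s : String) :
    pvValid s = !((PySem.Str.split₀ s).isEmpty || !((PySem.Str.split₀ s).all pvTok)) := by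
  simp [pvValid]

theorem pv_len_zero_invalid (s : String) (h : (PySem.Str.len s == 0) = true) :
    ((PySem.Str.split₀ s).isEmpty || !((PySem.Str.split₀ s).all pvTok)) = true := by
  rw [pv_len_zero_split s h]; rfl

-- A's loop with a nonempty accumulator appends the valid prefix, stopping at the first invalid line
theorem pvLoopA_ne (ls : List String) (rows : List (List Int)) (h : rows ≠ []) :
    pvLoopA ls rows
      = rows ++ ((ls.map PySem.Str.strip).takeWhile pvValid).map
          (fun line => (PySem.Str.split₀ line).map pvInt) := by
  induction ls generalizing rows with
  | nil => simp [pvLoopA]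
  | cons raw rest ih =>
    have hre : rows.isEmpty = false := by simpa using h
    show (if (PySem.Str.len (PySem.Str.strip raw) == 0) = true then
            (if rows.isEmpty = true then pvLoopA rest rows else rows)
          else if ((PySem.Str.split₀ (PySem.Str.strip raw)).isEmpty || !((PySem.Str.split₀ (PySem.Str.strip raw)).all pvTok)) = true then
            (if rows.isEmpty = true then pvLoopA rest rows else rows)
          else pvLoopA rest (rows ++ [(PySem.Str.split₀ (PySem.Str.strip raw)).map pvInt]))
        = _
    by_cases hp : ((PySem.Str.split₀ (PySem.Str.strip raw)).isEmpty || !((PySem.Str.split₀ (PySem.Str.strip raw)).all pvTok)) = true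
    · have hv : pvValid (PySem.Str.strip raw) = false := by rw [pvValid_eq, hp]; rfl
      have hrow : (if rows.isEmpty = true then pvLoopA rest rows else rows) = rows := by
        rw [if_neg (by simp [hre])]
      by_cases hl : (PySem.Str.len (PySem.Str.strip raw) == 0) = true
      · rw [if_pos hl, hrow, List.map_cons, List.takeWhile_cons, hv]; simp
      · rw [if_neg hl, if_pos hp, hrow, List.map_cons, List.takeWhile_cons, hv]; simp
    · have hv : pvValid (PySem.Str.strip raw) = true := by
        rw [pvValid_eq]; simp only [Bool.not_eq_true] at hp; rw [hp]; rfl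
      have hl : ¬ (PySem.Str.len (PySem.Str.strip raw) == 0) = true := by
        intro hc
        exact hp (pv_len_zero_invalid _ hc)
      rw [if_neg hl, if_neg hp]
      rw [ih (rows ++ [(PySem.Str.split₀ (PySem.Str.strip raw)).map pvInt]) (by simp)]
      rw [List.map_cons, List.takeWhile_cons, hv]
      simp

-- A's loop from the empty accumulator: drop invalid lines, then take the valid block
theorem pvLoopA_nil (ls : List String) :
    pvLoopA ls []
      = (((ls.map PySem.Str.strip).dropWhile (fun l => !pvValid l)).takeWhile pvValid).map
          (fun line => (PySem.Str.split₀ line).map pvInt) := by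
  induction ls with
  | nil => simp [pvLoopA]
  | cons raw rest ih =>
    simp only [pvLoopA, List.isEmpty_nil, if_true]
    by_cases hp : ((PySem.Str.split₀ (PySem.Str.strip raw)).isEmpty || !((PySem.Str.split₀ (PySem.Str.strip raw)).all pvTok)) = true
    · have hv : pvValid (PySem.Str.strip raw) = false := by rw [pvValid_eq, hp]; rfl
      by_cases hl : (PySem.Str.len (PySem.Str.strip raw) == 0) = true
      · rw [if_pos hl, ih, List.map_cons, List.dropWhile_cons, hv]; simp
      · rw [if_neg hl, if_pos hp, ih, List.map_cons, List.dropWhile_cons, hv]; simp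
    · have hv : pvValid (PySem.Str.strip raw) = true := by
        rw [pvValid_eq]; simp only [Bool.not_eq_true] at hp; rw [hp]; rfl
      have hl : ¬ (PySem.Str.len (PySem.Str.strip raw) == 0) = true := by
        intro hc
        exact hp (pv_len_zero_invalid _ hc)
      rw [if_neg hl, if_neg hp, List.nil_append]
      rw [pvLoopA_ne rest [(PySem.Str.split₀ (PySem.Str.strip raw)).map pvInt] (by simp)]
      rw [List.map_cons, List.dropWhile_cons, hv]
      simp [hv]

-- pvScan from i is i plus the length of the satisfied prefix of drop i
theorem pvScan_eq (p : String → Bool) (lines : List String) :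
    ∀ i, i ≤ lines.length → pvScan p lines i = i + ((lines.drop i).takeWhile p).length := by
  have key : ∀ k i, lines.length - i ≤ k →
      pvScan p lines i = i + ((lines.drop i).takeWhile p).length := by
    intro k
    induction k with
    | zero =>
      intro i hk
      have hge : lines.length ≤ i := by omega
      rw [pvScan, dif_neg (by omega)]
      rw [List.drop_eq_nil_of_le hge]
      simp
    | succ k ih =>
      intro i hk
      by_cases h : i < lines.length
      · rw [pvScan, dif_pos h]
        rw [List.drop_eq_getElem_cons h]
        by_cases hp : p lines[i] = true
        · rw [if_pos hp, ih (i + 1) (by omega), List.takeWhile_cons, hp]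
          simp; omega
        · rw [if_neg hp, List.takeWhile_cons]
          simp only [Bool.not_eq_true] at hp
          rw [hp]
          simp
      · rw [pvScan, dif_neg h]
        rw [List.drop_eq_nil_of_le (by omega)]
        simp
  intro i hi; exact key (lines.length - i) i (le_refl _)

-- B's two scans and slice produce the drop-then-take block
theorem pv_slice_eq (q : String → Bool) (lines : List String) :
    PySem.List.slice lines (some ((pvScan (fun l => !q l) lines 0 : Nat) : Int))
        (some ((pvScan q lines (pvScan (fun l => !q l) lines 0) : Nat) : Int))
      = (lines.dropWhile (fun l => !q l)).takeWhile q := by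
  set i := pvScan (fun l => !q l) lines 0 with hi
  have hi0 : i = (lines.takeWhile (fun l => !q l)).length := by
    rw [hi, pvScan_eq _ _ 0 (by omega)]; simp
  have hile : i ≤ lines.length := by rw [hi0]; exact (List.takeWhile_prefix _).length_le
  have hdrop : lines.drop i = lines.dropWhile (fun l => !q l) := by
    conv_lhs => rw [← List.takeWhile_append_dropWhile (p := fun l => !q l) (l := lines)]
    rw [hi0, List.drop_left]
  have hj : pvScan q lines i = i + ((lines.dropWhile (fun l => !q l)).takeWhile q).length := by
    rw [pvScan_eq _ _ i hile, hdrop]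
  rw [PySem.List.slice_natCast, hj, hdrop]
  have : i + ((lines.dropWhile (fun l => !q l)).takeWhile q).length - i
      = ((lines.dropWhile (fun l => !q l)).takeWhile q).length := by omega
  rw [this]
  exact (List.prefix_iff_eq_take.mp (List.takeWhile_prefix _)).symm

-- Set.add never shrinks a set
theorem pv_setadd_mono (l : List Nat) : ∀ s : PySem.Set Nat, s.length ≤ (l.foldl PySem.Set.add s).length := by
  induction l with
  | nil => intro s; simp
  | cons x l ih =>
    intro s
    refine le_trans ?_ (ih (PySem.Set.add s x))
    simp only [PySem.Set.add]
    split <;> simp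

-- the set of values is a singleton iff every value equals the first
theorem pv_set_single (w : Nat) (l : List Nat) :
    ((PySem.Set.ofList (w :: l)).length = 1) ↔ (∀ x ∈ l, x = w) := by
  rw [PySem.Set.ofList_eq_foldl]
  have h0 : List.foldl PySem.Set.add ([] : PySem.Set Nat) (w :: l) = List.foldl PySem.Set.add [w] l := by
    simp [PySem.Set.add, PySem.Set.contains]
  rw [h0]
  clear h0
  induction l with
  | nil => simp
  | cons x l ih =>
    simp only [List.foldl_cons]
    by_cases hx : x = w
    · subst hx
      have : PySem.Set.add [x] x = [x] := by simp [PySem.Set.add, PySem.Set.contains]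
      rw [this]
      constructor
      · intro h y hy
        rcases List.mem_cons.mp hy with hy | hy
        · exact hy
        · exact ih.mp h y hy
      · intro h
        exact ih.mpr (fun y hy => h y (List.mem_cons_of_mem _ hy))
    · have : PySem.Set.add [w] x = [w, x] := by
        simp [PySem.Set.add, PySem.Set.contains, hx]
      rw [this]
      constructor
      · intro h
        have := pv_setadd_mono l [w, x]
        simp at this; omega
      · intro h
        exact absurd (h x (by simp)) hx

-- ===== VERDICT (by name: the statement is the Claim_ definition above) =====
theorem parse_grid_text_spec : Claim_equal_parse_grid_text := by
  unfold Claim_equal_parse_grid_text Spec_parse_grid_text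
  intro text _
  simp only [parse_grid_text, parse_grid_text_alt]
  rw [pvLoopA_nil, pv_slice_eq pvValid ((PySem.Str.splitlines (PySem.Str.strip text)).map PySem.Str.strip)]
  set g := ((((PySem.Str.splitlines (PySem.Str.strip text)).map PySem.Str.strip).dropWhile
      (fun l => !pvValid l)).takeWhile pvValid).map
        (fun line => (PySem.Str.split₀ line).map pvInt) with hg
  cases g with
  | nil => simp
  | cons r rs =>
    simp only [List.isEmpty_cons, Bool.false_eq_true, if_false, List.headD_cons, List.map_cons]
    by_cases hall : ∀ row ∈ rs, row.length = r.length
    · have hset : ((PySem.Set.ofList (r.length :: rs.map List.length)).length == 1) = true := by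
        simp only [beq_iff_eq]
        exact (pv_set_single r.length (rs.map List.length)).mpr (by
          intro x hx
          rcases List.mem_map.mp hx with ⟨row, hrow, hxe⟩
          rw [← hxe]; exact hall row hrow)
      have hany : ((r :: rs).any (fun row => row.length != r.length)) = false := by
        simp only [List.any_eq_false]
        intro row hrow
        rcases List.mem_cons.mp hrow with h | h
        · subst h; simp
        · simp [hall row h]
      rw [if_neg (by simp [hany]), if_pos hset]
    · have hset : ((PySem.Set.ofList (r.length :: rs.map List.length)).length == 1) = false := by
        simp only [beq_eq_false_iff_ne, Ne]
        intro hc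
        exact hall (by
          intro row hrow
          exact (pv_set_single r.length (rs.map List.length)).mp hc row.length
            (List.mem_map.mpr ⟨row, hrow, rfl⟩))
      have hany : ((r :: rs).any (fun row => row.length != r.length)) = true := by
        push Not at hall
        rcases hall with ⟨row, hrow, hne⟩
        exact List.any_eq_true.mpr ⟨row, List.mem_cons_of_mem _ hrow, by simpa using hne⟩
      rw [if_pos hany, if_neg (by simp [hset])]
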